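-- pv_equiv track=rewrite | github.com/Tekisha/Search-engine- | projekat2_sv_33_2021/main.py | FRAZA_zajednicki_recnik_rezultata
-- ===== SOURCE A (Python) =====
-- def FRAZA_zajednicki_recnik_rezultata(main_words_info):
--     common_keys = set(main_words_info[0][0][1])
--
--     glavni_recnik = {}
--
--     for lista in main_words_info:  #nalazimo presjek svih fajlova koji sadrze sve rijeci fraze
--         recnik = set(lista[0][1])
--         common_keys = common_keys & recnik
--
--     common_keys = list(common_keys)
--     for lista in main_words_info: #racunamo ukupan broj ponavljanja rijeci
--         recnik = lista[0][1]
--         for key in common_keys: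
--             if key in glavni_recnik.keys():
--                 glavni_recnik[key]+= recnik[key]
--             else:
--                 glavni_recnik[key] = recnik[key]
--
--     return glavni_recnik
-- ===== SOURCE B (Python) =====
-- def FRAZA_zajednicki_recnik_rezultata(main_words_info):
--     dicts = [lista[0][1] for lista in main_words_info]
--     return {k: sum(d[k] for d in dicts)
--             for k in dicts[0] if all(k in d for d in dicts)}
-- ===== Notes on version B (the rewrite author's own statement) =====
-- stated objective: simpler
-- what changed: B drops A's file-outer/key-inner accumulation loop with its init-or-add dict branch and instead builds the result with one key-outer dict comprehension that sums each common key's value across all files.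
import Mathlib
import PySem

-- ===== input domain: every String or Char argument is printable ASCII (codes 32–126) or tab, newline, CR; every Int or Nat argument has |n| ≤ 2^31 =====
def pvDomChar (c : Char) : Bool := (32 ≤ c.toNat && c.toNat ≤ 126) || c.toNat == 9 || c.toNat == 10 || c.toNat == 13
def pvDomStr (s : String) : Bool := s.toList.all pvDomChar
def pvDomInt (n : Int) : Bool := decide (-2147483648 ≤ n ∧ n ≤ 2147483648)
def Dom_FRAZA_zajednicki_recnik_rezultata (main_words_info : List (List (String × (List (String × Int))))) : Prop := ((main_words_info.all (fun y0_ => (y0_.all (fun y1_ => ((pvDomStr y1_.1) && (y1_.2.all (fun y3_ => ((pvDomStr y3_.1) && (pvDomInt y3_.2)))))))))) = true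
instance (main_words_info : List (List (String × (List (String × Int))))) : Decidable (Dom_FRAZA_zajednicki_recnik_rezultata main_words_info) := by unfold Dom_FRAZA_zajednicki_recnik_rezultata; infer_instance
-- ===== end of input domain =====

-- B replaces A's two-phase accumulation (file-outer/key-inner loop with an init-or-add branch updating a dict)
-- by a single key-outer comprehension that sums each common key's value across all files; objective: simpler.

-- ===== PORT A =====
-- lista[0][1] is a Python dict; the assoc-list argument is read through PySem.Dict.ofList (dict(pairs) semantics).
-- `lista.headD ("", [])` is lista[0]; it is only reached with lista ≠ [] (guaranteed by Pre_), the default is junk.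
def FRAZA_zajednicki_recnik_rezultata (main_words_info : List (List (String × (List (String × Int))))) : List (String × Int) :=
  match main_words_info with
  | [] => []  -- main_words_info[0] raises IndexError here (outside Pre_)
  | first :: _ =>
    let common0 : PySem.Set String :=
      PySem.Set.ofList (PySem.Dict.ofList (first.headD ("", [])).2).keys
    let common_keys : PySem.Set String :=
      main_words_info.foldl
        (fun ck lista =>
          PySem.Set.inter ck
            (PySem.Set.ofList (PySem.Dict.ofList (lista.headD ("", [])).2).keys))
        common0
    let glavni : PySem.Dict String Int :=
      main_words_info.foldl
        (fun g lista =>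
          let recnik := PySem.Dict.ofList (lista.headD ("", [])).2
          common_keys.foldl
            (fun g key =>
              if g.contains key then g.insert key (g.getD key 0 + recnik.getD key 0)
              else g.insert key (recnik.getD key 0))
            g)
        PySem.Dict.empty
    glavni.items

-- ===== PORT B =====
def FRAZA_zajednicki_recnik_rezultata_alt (main_words_info : List (List (String × (List (String × Int))))) : List (String × Int) :=
  let dicts := main_words_info.map (fun lista => PySem.Dict.ofList (lista.headD ("", [])).2)
  match dicts with
  | [] => []  -- dicts[0] raises IndexError here (outside Pre_)
  | d0 :: _ =>
    -- {k: sum(d[k] for d in dicts) for k in dicts[0] if all(k in d for d in dicts)}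
    ((d0.keys.filter (fun k => dicts.all (fun d => d.contains k))).foldl
       (fun g k => g.insert k ((dicts.map (fun d => d.getD k 0)).sum))
       (PySem.Dict.empty : PySem.Dict String Int)).items

-- ===== PRECONDITION & SPEC =====
-- A raises IndexError on main_words_info[0] / lista[0] when the outer list or any inner list is empty;
-- Pre_ excludes exactly those inputs.
def Pre_FRAZA_zajednicki_recnik_rezultata (main_words_info : List (List (String × (List (String × Int))))) : Prop :=
  main_words_info ≠ [] ∧ ∀ lista ∈ main_words_info, lista ≠ []
instance (main_words_info : List (List (String × (List (String × Int))))) : Decidable (Pre_FRAZA_zajednicki_recnik_rezultata main_words_info) := by unfold Pre_FRAZA_zajednicki_recnik_rezultata; infer_instance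
def pvWitness_FRAZA_zajednicki_recnik_rezultata : (List (List (String × (List (String × Int))))) :=
  [[("f0", [("word", 2), ("w2", 1)])], [("g0", [("word", 3)])]]
def Spec_FRAZA_zajednicki_recnik_rezultata (main_words_info : List (List (String × (List (String × Int))))) (out : List (String × Int)) : Prop := out = FRAZA_zajednicki_recnik_rezultata_alt main_words_info
instance (main_words_info : List (List (String × (List (String × Int))))) (out : List (String × Int)) : Decidable (Spec_FRAZA_zajednicki_recnik_rezultata main_words_info out) := by unfold Spec_FRAZA_zajednicki_recnik_rezultata; infer_instance

-- ===== CLAIM (what is proved, stated in full; the proofs are below) =====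
def Claim_equal_FRAZA_zajednicki_recnik_rezultata : Prop := ∀ (main_words_info : List (List (String × (List (String × Int))))), Dom_FRAZA_zajednicki_recnik_rezultata main_words_info → Pre_FRAZA_zajednicki_recnik_rezultata main_words_info → Spec_FRAZA_zajednicki_recnik_rezultata main_words_info (FRAZA_zajednicki_recnik_rezultata main_words_info)

-- ===== LEMMAS AND PROOFS =====

-- The intersection loop is a filter of the accumulator.
theorem pv_foldl_inter {α : Type} (ms : List α) (key : α → PySem.Set String) (s : PySem.Set String) :
    ms.foldl (fun ck x => PySem.Set.inter ck (key x)) s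
      = s.filter (fun k => ms.all (fun x => (key x).contains k)) := by
  induction ms generalizing s with
  | nil => simp
  | cons x ms ih =>
    rw [List.foldl_cons, ih]
    simp only [PySem.Set.inter, List.filter_filter, List.all_cons]
    apply List.filter_congr
    intro k _
    cases (key x).contains k <;> simp

-- A's init-or-add branch is a single accumulate-insert.
theorem pv_branch_eq (g : PySem.Dict String Int) (k : String) (v : Int) :
    (if g.contains k then g.insert k (g.getD k 0 + v) else g.insert k v)
      = g.insert k (g.getD k 0 + v) := by
  cases h : g.contains k with
  | true => simp
  | false =>
    have h0 : g.get? k = none := (PySem.Dict.get?_eq_none_iff_contains g k).mpr h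
    have hz : g.getD k 0 = 0 := by simp [PySem.Dict.getD, h0]
    rw [hz, zero_add]
    simp

-- getD after one accumulate-insert pass over a Nodup key list.
theorem pv_getD_pass (ks : List String) (hnd : ks.Nodup) (w : String → Int)
    (g : PySem.Dict String Int) (k' : String) :
    (ks.foldl (fun g k => g.insert k (g.getD k 0 + w k)) g).getD k' 0
      = g.getD k' 0 + (if k' ∈ ks then w k' else 0) := by
  induction ks generalizing g with
  | nil => simp
  | cons k0 ks ih =>
    simp only [List.foldl_cons]
    rw [ih (List.Nodup.of_cons hnd)]
    rw [PySem.Dict.getD_insert]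
    by_cases hk : k' = k0
    · subst hk
      have : k' ∉ ks := (List.nodup_cons.mp hnd).1
      simp [this]
    · simp [hk, List.mem_cons]

-- keys after one accumulate-insert pass.
theorem pv_keys_pass (ks : List String) (w : String → Int) (g : PySem.Dict String Int) :
    (ks.foldl (fun g k => g.insert k (g.getD k 0 + w k)) g).keys
      = PySem.Set.update g.keys ks :=
  PySem.Dict.keys_foldl_insert ks (fun g k => g.getD k 0 + w k) g

-- updating a set with keys it already holds changes nothing.
theorem pv_update_of_subset (s : PySem.Set String) (ks : List String)
    (h : ∀ k ∈ ks, k ∈ s) : PySem.Set.update s ks = s := by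
  induction ks generalizing s with
  | nil => rfl
  | cons k0 ks ih =>
    have hc : s.contains k0 = true :=
      List.elem_eq_true_of_mem (h k0 List.mem_cons_self)
    simp only [PySem.Set.update, List.foldl_cons, PySem.Set.add, hc, if_pos]
    exact ih s (fun k hk => h k (List.mem_cons_of_mem _ hk))

-- keys of A's whole accumulation loop (nonempty file list).
theorem pv_keys_outer {α : Type} (ms : List α) (ks : List String) (hnd : ks.Nodup)
    (w : α → String → Int) (x0 : α) :
    ((x0 :: ms).foldl
        (fun g x => ks.foldl (fun g k => g.insert k (g.getD k 0 + w x k)) g)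
        (PySem.Dict.empty : PySem.Dict String Int)).keys = ks := by
  have base : (ks.foldl (fun g k => g.insert k (g.getD k 0 + w x0 k))
      (PySem.Dict.empty : PySem.Dict String Int)).keys = ks := by
    rw [pv_keys_pass]
    simp only [PySem.Dict.keys_empty]
    exact PySem.Set.ofList_eq_self_of_nodup ks hnd
  simp only [List.foldl_cons]
  generalize hG : (ks.foldl (fun g k => g.insert k (g.getD k 0 + w x0 k))
      (PySem.Dict.empty : PySem.Dict String Int)) = G at base
  clear hG
  induction ms generalizing G with
  | nil => exact base
  | cons x ms ih =>
    simp only [List.foldl_cons]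
    apply ih
    rw [pv_keys_pass, base]
    exact pv_update_of_subset ks ks (fun k hk => hk)

-- getD of A's whole accumulation loop.
theorem pv_getD_outer {α : Type} (ms : List α) (ks : List String) (hnd : ks.Nodup)
    (w : α → String → Int) (g : PySem.Dict String Int) (k : String) :
    (ms.foldl (fun g x => ks.foldl (fun g k => g.insert k (g.getD k 0 + w x k)) g) g).getD k 0
      = g.getD k 0 + (if k ∈ ks then (ms.map (fun x => w x k)).sum else 0) := by
  induction ms generalizing g with
  | nil => simp
  | cons x ms ih =>
    simp only [List.foldl_cons]
    rw [ih, pv_getD_pass ks hnd (w x) g k]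
    by_cases hk : k ∈ ks
    · simp [hk]; ring
    · simp [hk]

-- set(lista[0][1]) membership = dict membership, for any lista
theorem pv_set_keys_contains (l : List (String × (List (String × Int)))) (k : String) :
    PySem.Set.contains (PySem.Set.ofList (PySem.Dict.ofList (l.headD ("", [])).2).keys) k
      = (PySem.Dict.ofList (l.headD ("", [])).2).contains k := by
  rw [PySem.Set.ofList_eq_self_of_nodup _ (PySem.Dict.nodup_keys_ofList _)]
  rw [Bool.eq_iff_iff]
  simp [PySem.Set.contains, PySem.Dict.contains_iff_mem_keys]

-- ===== VERDICT (by name: the statement is the Claim_ definition above) =====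
theorem FRAZA_zajednicki_recnik_rezultata_spec : Claim_equal_FRAZA_zajednicki_recnik_rezultata := by
  intro m _hdom hpre
  obtain ⟨hne, _hinner⟩ := hpre
  unfold Spec_FRAZA_zajednicki_recnik_rezultata
  obtain ⟨first, rest, rfl⟩ : ∃ f r, m = f :: r := by
    cases m with
    | nil => exact absurd rfl hne
    | cons a b => exact ⟨a, b, rfl⟩
  -- the common-key list both programs compute, and the per-key total
  set KS : List String :=
    ((PySem.Dict.ofList (first.headD ("", [])).2).keys).filter
      (fun k => (first :: rest).all
        (fun l => (PySem.Dict.ofList (l.headD ("", [])).2).contains k)) with hKS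
  set S : String → Int :=
    fun k => ((first :: rest).map
      (fun l => (PySem.Dict.ofList (l.headD ("", [])).2).getD k 0)).sum with hS
  have hndKS : KS.Nodup := (PySem.Dict.nodup_keys_ofList _).filter _
  have hA : FRAZA_zajednicki_recnik_rezultata (first :: rest)
      = KS.map (fun k => (k, S k)) := by
    simp only [FRAZA_zajednicki_recnik_rezultata]
    rw [pv_foldl_inter]
    simp only [pv_set_keys_contains]
    rw [PySem.Set.ofList_eq_self_of_nodup _ (PySem.Dict.nodup_keys_ofList _), ← hKS]
    simp only [pv_branch_eq]
    have hkeys :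
        ((first :: rest).foldl
          (fun g lista => KS.foldl
            (fun g key => g.insert key
              (g.getD key 0 + (PySem.Dict.ofList (lista.headD ("", [])).2).getD key 0)) g)
          (PySem.Dict.empty : PySem.Dict String Int)).keys = KS :=
      pv_keys_outer rest KS hndKS
        (fun lista key => (PySem.Dict.ofList (lista.headD ("", [])).2).getD key 0) first
    rw [PySem.Dict.items_eq_map_keys _ (by rw [hkeys]; exact hndKS) 0, hkeys]
    apply List.map_eq_map_iff.mpr
    intro k hk
    rw [pv_getD_outer (first :: rest) KS hndKS
      (fun lista key => (PySem.Dict.ofList (lista.headD ("", [])).2).getD key 0)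
      PySem.Dict.empty k]
    simp [hk, hS]
  have hB : FRAZA_zajednicki_recnik_rezultata_alt (first :: rest)
      = KS.map (fun k => (k, S k)) := by
    simp only [FRAZA_zajednicki_recnik_rezultata_alt, List.map_cons]
    have hfilt :
        ((PySem.Dict.ofList (first.headD ("", [])).2).keys).filter
          (fun k => (PySem.Dict.ofList (first.headD ("", [])).2 ::
              rest.map (fun lista => PySem.Dict.ofList (lista.headD ("", [])).2)).all
            (fun d => d.contains k)) = KS := by
      rw [hKS]
      apply List.filter_congr
      intro k _
      simp only [List.all_cons, List.all_map, Function.comp_def]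
    rw [hfilt]
    rw [PySem.Dict.items_foldl_insert_fresh KS (fun a => a) _
      PySem.Dict.empty
      (fun a _ => PySem.Dict.contains_empty a)
      (by simpa using hndKS)]
    rw [show (PySem.Dict.empty : PySem.Dict String Int).items = [] from rfl, List.nil_append]
    apply List.map_eq_map_iff.mpr
    intro k _
    simp [hS, List.map_map, Function.comp_def]
  rw [hA, hB]
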